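-- pv_equiv track=rewrite | github.com/DarkBlood202/cards | src/functions.py | get_adjacent_cards
-- ===== SOURCE A (Python) =====
-- def get_adjacent_cards(slots, card):
--     card_index = slots.index(card)
--     adj_list = []
--     for index, element in enumerate(slots):
--         if index == 0:
--             adj_list.append((None, slots[index + 1]))
--         elif index == len(slots) - 1:
--             adj_list.append((slots[index - 1], None))
--         else:
--             adj_list.append((slots[index - 1], slots[index + 1]))
--     return adj_list[card_index]
-- ===== SOURCE B (Python) =====
-- def get_adjacent_cards(slots, card):
--     i = slots.index(card)
--     left = None if i == 0 else slots[i - 1]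
--     right = None if i == len(slots) - 1 else slots[i + 1]
--     return (left, right)
-- ===== Notes on version B (the rewrite author's own statement) =====
-- stated objective: simpler
-- what changed: B computes the two neighbors of the found index directly instead of building a full adjacency list over all slots and indexing into it.
import Mathlib
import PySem

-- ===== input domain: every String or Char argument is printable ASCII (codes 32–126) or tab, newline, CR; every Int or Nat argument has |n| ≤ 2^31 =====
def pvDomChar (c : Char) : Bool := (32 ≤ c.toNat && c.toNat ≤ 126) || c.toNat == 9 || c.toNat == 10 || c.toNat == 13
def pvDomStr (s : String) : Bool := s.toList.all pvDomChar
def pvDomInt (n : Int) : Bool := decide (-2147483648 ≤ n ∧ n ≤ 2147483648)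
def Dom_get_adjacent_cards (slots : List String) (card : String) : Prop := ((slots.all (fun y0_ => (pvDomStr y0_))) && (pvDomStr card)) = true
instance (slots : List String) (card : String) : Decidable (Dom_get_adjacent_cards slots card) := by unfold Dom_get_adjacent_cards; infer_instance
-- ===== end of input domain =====

-- B replaces A's full adjacency-list construction by a direct O(1) neighbor lookup after the index search (objective: simpler).

-- ===== PORT A =====
-- Literal port of A: find card's index, build the adjacency pair for EVERY slot, then index into that list.
-- pyGet?/index? return none exactly where Python raises (IndexError/ValueError); Pre_ excludes those inputs, and the
-- final .getD defaults are never reached inside Pre_.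
def get_adjacent_cards (slots : List String) (card : String) : Option String × Option String :=
  let card_index : Nat := (PySem.List.index? slots card).getD 0
  let adj_list : List (Option String × Option String) :=
    (PySem.List.enumerate slots).map (fun p =>
      if p.1 = 0 then (none, PySem.List.pyGet? slots (p.1 + 1))
      else if p.1 = (slots.length : Int) - 1 then (PySem.List.pyGet? slots (p.1 - 1), none)
      else (PySem.List.pyGet? slots (p.1 - 1), PySem.List.pyGet? slots (p.1 + 1)))
  (PySem.List.pyGet? adj_list (card_index : Int)).getD (none, none)

-- ===== PORT B =====
-- Literal port of Source B: compute the index once, then read the two neighbors directly.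
def get_adjacent_cards_alt (slots : List String) (card : String) : Option String × Option String :=
  let i : Nat := (PySem.List.index? slots card).getD 0
  let left : Option String := if i = 0 then none else PySem.List.pyGet? slots ((i : Int) - 1)
  let right : Option String := if (i : Int) = (slots.length : Int) - 1 then none else PySem.List.pyGet? slots ((i : Int) + 1)
  (left, right)

-- ===== PRECONDITION & SPEC =====
-- A raises ValueError when card is not in slots, and IndexError when slots has exactly one element
-- (its index-0 branch dereferences slots[1]); Pre_ excludes exactly those inputs.
def Pre_get_adjacent_cards (slots : List String) (card : String) : Prop :=
  card ∈ slots ∧ 2 ≤ slots.length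
instance (slots : List String) (card : String) : Decidable (Pre_get_adjacent_cards slots card) := by
  unfold Pre_get_adjacent_cards; infer_instance

def pvWitness_get_adjacent_cards : List String × String := (["a", "b", "c"], "b")

def Spec_get_adjacent_cards (slots : List String) (card : String) (out : Option String × Option String) : Prop := out = get_adjacent_cards_alt slots card
instance (slots : List String) (card : String) (out : Option String × Option String) : Decidable (Spec_get_adjacent_cards slots card out) := by unfold Spec_get_adjacent_cards; infer_instance

-- ===== CLAIM (what is proved, stated in full; the proofs are below) =====
def Claim_equal_get_adjacent_cards : Prop := ∀ (slots : List String) (card : String), Dom_get_adjacent_cards slots card → Pre_get_adjacent_cards slots card → Spec_get_adjacent_cards slots card (get_adjacent_cards slots card)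

-- ===== LEMMAS AND PROOFS =====

theorem index?_some_lt {xs : List String} {x : String} (h : x ∈ xs) :
    ∃ i, PySem.List.index? xs x = some i ∧ i < xs.length := by
  cases e : List.idxOf? x xs with
  | none =>
    have := List.idxOf?_eq_none_iff.mp e
    simp at this
    exact absurd h (by simpa using this)
  | some i =>
    obtain ⟨hlt, -⟩ := List.idxOf?_eq_some_iff.mp e
    exact ⟨i, by simpa [PySem.List.index?] using e, hlt⟩

theorem enumerate_getElem {α : Type} (xs : List α) (s : Int) (i : Nat) (h : i < xs.length) :
    (PySem.List.enumerate xs s)[i]'(by simpa using h) = (s + i, xs[i]) := by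
  induction xs generalizing s i with
  | nil => simp at h
  | cons a t ih =>
    cases i with
    | zero => simp [PySem.List.enumerate_cons]
    | succ j =>
      have := ih (s + 1) j (by simpa using Nat.lt_of_succ_lt_succ h)
      simp [PySem.List.enumerate_cons, this]
      ring

-- ===== VERDICT (by name: the statement is the Claim_ definition above) =====
theorem get_adjacent_cards_spec : Claim_equal_get_adjacent_cards := by
  intro slots card _ hpre
  obtain ⟨hmem, hlen⟩ := hpre
  obtain ⟨i, hidx, hilt⟩ := index?_some_lt hmem
  unfold Spec_get_adjacent_cards get_adjacent_cards get_adjacent_cards_alt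
  simp only [hidx, Option.getD_some]
  have henum : (PySem.List.enumerate slots)[i]? = some ((i : Int), slots[i]) := by
    rw [List.getElem?_eq_getElem (by simpa using hilt)]
    rw [enumerate_getElem slots 0 i hilt]
    simp
  have hadj :
      (PySem.List.pyGet?
        ((PySem.List.enumerate slots).map (fun p =>
          if p.1 = 0 then (none, PySem.List.pyGet? slots (p.1 + 1))
          else if p.1 = (slots.length : Int) - 1 then (PySem.List.pyGet? slots (p.1 - 1), none)
          else (PySem.List.pyGet? slots (p.1 - 1), PySem.List.pyGet? slots (p.1 + 1))))
        (i : Int)) =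
      some (if (i : Int) = 0 then (none, PySem.List.pyGet? slots ((i : Int) + 1))
        else if (i : Int) = (slots.length : Int) - 1 then (PySem.List.pyGet? slots ((i : Int) - 1), none)
        else (PySem.List.pyGet? slots ((i : Int) - 1), PySem.List.pyGet? slots ((i : Int) + 1))) := by
    rw [PySem.List.pyGet?_natCast]
    rw [List.getElem?_map, henum]
    rfl
  rw [hadj, Option.getD_some]
  by_cases h0 : i = 0
  · subst h0
    have hne : ¬ ((0 : Int) = (slots.length : Int) - 1) := by omega
    simp [hne]
  · have hi0 : ¬ ((i : Int) = 0) := by omega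
    have hl0 : ¬ ((slots.length : Int) - 1 = 0) := by omega
    by_cases hlast : (i : Int) = (slots.length : Int) - 1
    · simp [h0, hl0, hlast]
    · simp [h0, hlast]
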